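-- pv_equiv track=rewrite | github.com/teichbauer/solver18 | basics.py | expand_bitcombo
-- ===== SOURCE A (Python) =====
-- def get_bit(val, bit):
--     # get_bit(v = 1, bit = 0): 1,
--     # get_bit(v = 1, bit = 1): 0,
--     # -------------------
--     # get_bit(v = 5, bit = 0): 1,
--     # get_bit(v = 5, bit = 1): 0,
--     # get_bit(v = 5, bit = 2): 1,
--     # get_bit(v = 5, bit = 3): 0,
--     # get_bit(v = 5, bit = 4): 0,
--     # -------------------
--     return (val >> bit) & 1
--
-- def expand_bitcombo(bits):
--     # return a list of dics with 4 possible bit/bv combinations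
--     # example: bits = [2, 5]
--     # output: [{2:0, 5:0}, {2:0, 5:1}, {2:1, 5:0}, {2:1, 5:1}, ]
--     # ----------------------------------------------------------
--     maxv = 2 ** len(bits)
--     bleng = len(bits)
--     sats = []
--     for r in range(maxv):
--         dic = {}
--         for b in range(bleng):
--             v = get_bit(r, b)
--             dic[bits[b]] = v
--         sats.append(dic)
--     return sats
-- ===== SOURCE B (Python) =====
-- from itertools import product
--
-- def expand_bitcombo(bits):
--     # enumerate the combinations directly instead of counting r and shifting bits out;
--     # product varies the last coordinate fastest, so reversing each tuple keeps A's order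
--     return [dict(zip(bits, t[::-1])) for t in product((0, 1), repeat=len(bits))]
-- ===== Notes on version B (the rewrite author's own statement) =====
-- stated objective: idiomatic
-- what changed: Replaces the integer counter with bit-shift/mask extraction by a direct combinatorial enumeration via itertools.product, building each dict with dict(zip(...)) from the reversed tuple so the list order matches.
import Mathlib
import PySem

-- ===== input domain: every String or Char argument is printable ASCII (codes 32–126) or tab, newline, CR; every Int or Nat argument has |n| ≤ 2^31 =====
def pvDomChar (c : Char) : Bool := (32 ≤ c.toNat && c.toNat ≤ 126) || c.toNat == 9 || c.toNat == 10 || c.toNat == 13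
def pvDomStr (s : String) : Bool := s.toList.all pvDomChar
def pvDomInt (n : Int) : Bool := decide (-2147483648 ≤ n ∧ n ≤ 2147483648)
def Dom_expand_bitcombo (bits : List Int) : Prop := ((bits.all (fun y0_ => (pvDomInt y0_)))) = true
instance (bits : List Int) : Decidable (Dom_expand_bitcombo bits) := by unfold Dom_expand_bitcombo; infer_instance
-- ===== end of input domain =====

-- B enumerates the bit combinations directly with itertools.product instead of A's
-- integer counter with shift/mask extraction; same output and cost (objective: idiomatic).

-- ===== PORT A =====
-- (val >> bit) & 1 ; '>>' is Lean's '>>>' on Int with a Nat shift — exact for 0 ≤ bit,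
-- which holds at every call site (bit ranges over range(len(bits)))
def get_bit (val bit : Int) : Int :=
  PySem.Int.band (val >>> bit.toNat) 1

def expand_bitcombo (bits : List Int) : List (List (Int × Int)) :=
  let maxv : Int := 2 ^ bits.length
  let bleng : Int := (bits.length : Int)
  (PySem.List.pyRange 0 maxv 1).foldl (fun sats r =>
    let dic := (PySem.List.pyRange 0 bleng 1).foldl (fun dic b =>
      dic.insert (PySem.List.pyGetD bits b 0) (get_bit r b)) (PySem.Dict.empty : PySem.Dict Int Int)
    sats ++ [dic.items]) []

-- ===== PORT B =====
-- itertools.product((0, 1), repeat=n): leftmost coordinate is the outermost loop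
def prodTuples : Nat → List (List Int)
  | 0 => [[]]
  | n+1 => ([0, 1] : List Int).flatMap (fun x => (prodTuples n).map (fun t => x :: t))

-- dict(zip(bits, vals))
def dictZip (bits vals : List Int) : PySem.Dict Int Int :=
  (bits.zip vals).foldl (fun d p => d.insert p.1 p.2) PySem.Dict.empty

def expand_bitcombo_alt (bits : List Int) : List (List (Int × Int)) :=
  (prodTuples bits.length).map (fun t => (dictZip bits t.reverse).items)

-- ===== PRECONDITION & SPEC =====
def Spec_expand_bitcombo (bits : List Int) (out : List (List (Int × Int))) : Prop := out = expand_bitcombo_alt bits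
instance (bits : List Int) (out : List (List (Int × Int))) : Decidable (Spec_expand_bitcombo bits out) := by unfold Spec_expand_bitcombo; infer_instance

-- ===== CLAIM (what is proved, stated in full; the proofs are below) =====
def Claim_equal_expand_bitcombo : Prop := ∀ (bits : List Int), Dom_expand_bitcombo bits → Spec_expand_bitcombo bits (expand_bitcombo bits)

-- ===== LEMMAS AND PROOFS =====

-- bit b of r, as both ports compute it on the naturals the loops actually visit
def lsbF (r b : Nat) : Int := ((r >>> b) &&& 1 : Nat)

-- the common normal form for the dict produced for counter value r
def dicA (bits : List Int) (r : Nat) : PySem.Dict Int Int :=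
  (List.range bits.length).foldl (fun d b => d.insert (bits.getD b 0) (lsbF r b)) PySem.Dict.empty

theorem get_bit_natCast (r b : Nat) : get_bit (r : Int) (b : Nat) = lsbF r b := by
  unfold get_bit lsbF
  rw [Int.toNat_natCast, ← Int.natCast_shiftRight, show (1:Int) = ((1:Nat):Int) from rfl,
    PySem.Int.band_natCast]

theorem lsbF_div (r b : Nat) : lsbF r b = ((r / 2^b) % 2 : Nat) := by
  unfold lsbF; rw [Nat.shiftRight_eq_div_pow, Nat.and_one_is_mod]

theorem lsbF_high0 (n r : Nat) (h : r < 2^n) : lsbF r n = 0 := by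
  rw [lsbF_div, Nat.div_eq_of_lt h]; rfl

theorem lsbF_high1 (n r : Nat) (h : r < 2^n) : lsbF (2^n + r) n = 1 := by
  rw [lsbF_div, Nat.add_comm, Nat.add_div_right r (Nat.two_pow_pos n), Nat.div_eq_of_lt h]
  norm_num

theorem lsbF_low (n b r : Nat) (hb : b < n) : lsbF (2^n + r) b = lsbF r b := by
  rw [lsbF_div, lsbF_div]
  have hn : 2^n = 2^b * (2^(n-b-1) * 2) := by
    rw [← pow_succ, ← pow_add]
    congr 1
    omega
  rw [hn, Nat.add_comm, Nat.add_mul_div_left r _ (Nat.two_pow_pos b),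
    Nat.add_mul_mod_self_right]

-- A's inner loop for one r equals the normal form
theorem inner_eq (bits : List Int) (r : Nat) :
    (PySem.List.pyRange 0 (bits.length : Int) 1).foldl (fun dic b =>
      dic.insert (PySem.List.pyGetD bits b 0) (get_bit (r : Int) b)) (PySem.Dict.empty : PySem.Dict Int Int)
    = dicA bits r := by
  rw [PySem.List.pyRange_one, List.foldl_map]
  unfold dicA
  simp only [sub_zero, Int.toNat_natCast, zero_add]
  refine PySem.List.foldl_congr_mem _ _ _ _ (fun d b hb => ?_)
  rw [PySem.List.pyGetD_natCast, get_bit_natCast]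

theorem lemA (bits : List Int) :
    expand_bitcombo bits = (List.range (2 ^ bits.length)).map (fun r => (dicA bits r).items) := by
  unfold expand_bitcombo
  dsimp only
  rw [PySem.List.pyRange_one 0 (2 ^ bits.length), List.foldl_map,
    PySem.List.foldl_append_singleton_eq_map]
  simp only [sub_zero, List.nil_append]
  have h2 : ((2:Int) ^ bits.length).toNat = 2 ^ bits.length := by
    rw [show ((2:Int) ^ bits.length) = ((2 ^ bits.length : Nat) : Int) by push_cast; ring,
      Int.toNat_natCast]
  rw [h2]
  refine List.map_congr_left (fun r _ => ?_)
  rw [show (0 + (r:Int)) = (r:Int) by ring, inner_eq]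

-- the product tuples are exactly the MSB-first binary digits of 0, 1, …, 2^n - 1
theorem lemP (n : Nat) :
    prodTuples n = (List.range (2 ^ n)).map (fun r => ((List.range n).map (lsbF r)).reverse) := by
  induction n with
  | zero => rfl
  | succ n ih =>
    rw [prodTuples, List.range_succ, show 2 ^ (n+1) = 2^n + 2^n by ring, List.range_add,
      List.map_append]
    simp only [List.flatMap_cons, List.flatMap_nil, List.append_nil, ih, List.map_map]
    congr 1
    · refine List.map_congr_left (fun r hr => ?_)
      simp only [List.mem_range] at hr
      simp [List.map_append, List.reverse_append, lsbF_high0 n r hr]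
    · refine List.map_congr_left (fun r hr => ?_)
      simp only [List.mem_range] at hr
      simp only [Function.comp, List.map_append, List.reverse_append, List.map_cons,
        List.map_nil, List.reverse_cons, List.reverse_nil, List.nil_append,
        List.singleton_append]
      rw [lsbF_high1 n r hr]
      congr 1
      rw [List.reverse_inj]
      refine List.map_congr_left (fun b hb => ?_)
      simp only [List.mem_range] at hb
      exact (lsbF_low n b r hb).symm

theorem lemZ (bits : List Int) (f : Nat → Int) :
    bits.zip ((List.range bits.length).map f)
      = (List.range bits.length).map (fun k => (bits.getD k 0, f k)) := by
  induction bits generalizing f with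
  | nil => rfl
  | cons x xs ih =>
    simp only [List.length_cons, List.range_succ_eq_map, List.map_cons, List.map_map,
      List.zip_cons_cons]
    rw [show (f ∘ Nat.succ) = (fun k => f (k+1)) from rfl, ih (fun k => f (k+1))]
    simp [Function.comp]

theorem lemB (bits : List Int) :
    expand_bitcombo_alt bits = (List.range (2 ^ bits.length)).map (fun r => (dicA bits r).items) := by
  unfold expand_bitcombo_alt
  rw [lemP, List.map_map]
  refine List.map_congr_left (fun r _ => ?_)
  simp only [Function.comp, List.reverse_reverse]
  unfold dictZip dicA
  rw [lemZ bits (lsbF r), List.foldl_map]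

-- ===== VERDICT (by name: the statement is the Claim_ definition above) =====
theorem expand_bitcombo_spec : Claim_equal_expand_bitcombo := by
  intro bits _
  unfold Spec_expand_bitcombo
  rw [lemA, lemB]
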